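-- pv_equiv track=rewrite | github.com/varouzan/ece303 | 2018/packaging.py | itofx
-- ===== SOURCE A (Python) =====
-- def itofx(n):
--     l=[]
--     for i in range(7,0,-2):
--         a=n//16**i
--         n=n-a*(16**i)
--         b=n//16**(i-1)
--         n=n-b*16**(i-1)
--         l.append(a*16+b)
--     return l
-- ===== SOURCE B (Python) =====
-- def itofx(n):
--     l = []
--     for _ in range(3):
--         n, r = divmod(n, 256)
--         l.append(r)
--     l.append(n)
--     l.reverse()
--     return l
-- ===== Notes on version B (the rewrite author's own statement) =====
-- stated objective: simpler
-- what changed: B extracts bytes least-significant-first with three divmod-by-256 steps plus the final unmasked quotient and reverses the list, instead of A's big-endian loop over descending hex powers that combines two nibbles per byte with explicit remainder subtraction.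
import Mathlib
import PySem

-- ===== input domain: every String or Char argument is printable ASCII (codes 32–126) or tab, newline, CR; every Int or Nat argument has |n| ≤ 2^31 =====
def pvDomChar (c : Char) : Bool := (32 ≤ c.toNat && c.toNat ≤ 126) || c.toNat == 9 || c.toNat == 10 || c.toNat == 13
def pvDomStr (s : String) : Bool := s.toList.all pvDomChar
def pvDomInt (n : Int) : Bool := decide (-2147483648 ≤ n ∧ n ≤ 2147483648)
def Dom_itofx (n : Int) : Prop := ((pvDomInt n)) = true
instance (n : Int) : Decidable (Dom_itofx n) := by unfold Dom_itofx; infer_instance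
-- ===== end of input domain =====

-- B splits into bytes least-significant-first with divmod(n,256) and reverses (simpler decomposition, same values).

-- ===== PORT A =====
-- fold over range(7,0,-2); state = (n, l), each step combines two hex nibbles a*16+b
def itofx (n : Int) : List Int :=
  (PySem.List.pyRange 7 0 (-2)).foldl
    (fun (st : Int × List Int) (i : Int) =>
      let n := st.1
      let a := PySem.Int.floordiv n (16 ^ i.toNat)
      let n := n - a * 16 ^ i.toNat
      let b := PySem.Int.floordiv n (16 ^ (i - 1).toNat)
      let n := n - b * 16 ^ (i - 1).toNat
      (n, st.2 ++ [a * 16 + b]))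
    (n, [])
  |>.2

-- ===== PORT B =====
-- for _ in range(3): n, r = divmod(n, 256); l.append(r)
def itofxAltLoop (k : Nat) (n : Int) (l : List Int) : Int × List Int :=
  match k with
  | 0 => (n, l)
  | Nat.succ k => itofxAltLoop k (PySem.Int.floordiv n 256) (l ++ [PySem.Int.mod n 256])

def itofx_alt (n : Int) : List Int :=
  let (n, l) := itofxAltLoop 3 n []
  (l ++ [n]).reverse

-- ===== PRECONDITION & SPEC =====
def Spec_itofx (n : Int) (out : List Int) : Prop := out = itofx_alt n
instance (n : Int) (out : List Int) : Decidable (Spec_itofx n out) := by unfold Spec_itofx; infer_instance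

-- ===== CLAIM (what is proved, stated in full; the proofs are below) =====
def Claim_equal_itofx : Prop := ∀ (n : Int), Dom_itofx n → Spec_itofx n (itofx n)

-- ===== LEMMAS AND PROOFS =====

-- ===== VERDICT (by name: the statement is the Claim_ definition above) =====
theorem itofx_spec : Claim_equal_itofx := by
  intro n _
  unfold Spec_itofx itofx itofx_alt
  norm_num [PySem.List.pyRange, List.foldl, PySem.Int.floordiv, PySem.Int.mod,
    List.range_succ, Int.fdiv_eq_ediv, Int.fmod_eq_emod, List.cons.injEq, itofxAltLoop, show Int.toNat 4 = 4 from rfl, show Int.toNat 7 = 7 from rfl,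
    show Int.toNat 5 = 5 from rfl, show Int.toNat 3 = 3 from rfl, show Int.toNat 1 = 1 from rfl]
  omega
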